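-- pv_equiv track=rewrite | github.com/tlmstbs/pyth0n | laba1/laba1.py | sym_replace_area_1_and_3
-- ===== SOURCE A (Python) =====
-- def in_area(i, j, N, area_num):
--     if area_num == 1:
--         return i > j and i + j < N - 1
--     elif area_num == 2:
--         return i < j and i + j < N - 1
--     elif area_num == 3:
--         return i < j and i + j > N - 1
--     elif area_num == 4:
--         return i > j and i + j > N - 1
--     return False
--
-- def sym_replace_area_1_and_3(matrix, N, triangle_1, triangle_3):
--     idx_1 = 0
--     idx_3 = 0
--
--     for i in range(N):
--         for j in range(N):
--             if in_area(i, j, N, 1):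
--                 matrix[i][j] = triangle_3[idx_3]
--                 idx_3 += 1
--             elif in_area(i, j, N, 3):
--                 matrix[i][j] = triangle_1[idx_1]
--                 idx_1 += 1
--     return matrix
-- ===== SOURCE B (Python) =====
-- def sym_replace_area_1_and_3(matrix, N, triangle_1, triangle_3):
--     # Per-row bounds instead of scanning all N*N cells with a membership test:
--     # row i (1 <= i <= N-2) gets k = min(i, N-1-i) area-1 cells at j in [0, k)
--     # and k area-3 cells at j in [N-k, N); rows 0 and N-1 have none.
--     idx_1 = 0
--     idx_3 = 0
--     for i in range(1, N - 1):
--         k = min(i, N - 1 - i)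
--         row = matrix[i]
--         for j in range(k):
--             row[j] = triangle_3[idx_3]
--             idx_3 += 1
--         for j in range(N - k, N):
--             row[j] = triangle_1[idx_1]
--             idx_1 += 1
--     return matrix
-- ===== Notes on version B (the rewrite author's own statement) =====
-- stated objective: simpler
-- what changed: B drops the in_area membership test and the full N x N scan: for each interior row i it fills the k = min(i, N-1-i) area-1 cells j in [0,k) from triangle_3 and the k area-3 cells j in [N-k,N) from triangle_1 directly via computed per-row index ranges, preserving A's assignment order.
import Mathlib
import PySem

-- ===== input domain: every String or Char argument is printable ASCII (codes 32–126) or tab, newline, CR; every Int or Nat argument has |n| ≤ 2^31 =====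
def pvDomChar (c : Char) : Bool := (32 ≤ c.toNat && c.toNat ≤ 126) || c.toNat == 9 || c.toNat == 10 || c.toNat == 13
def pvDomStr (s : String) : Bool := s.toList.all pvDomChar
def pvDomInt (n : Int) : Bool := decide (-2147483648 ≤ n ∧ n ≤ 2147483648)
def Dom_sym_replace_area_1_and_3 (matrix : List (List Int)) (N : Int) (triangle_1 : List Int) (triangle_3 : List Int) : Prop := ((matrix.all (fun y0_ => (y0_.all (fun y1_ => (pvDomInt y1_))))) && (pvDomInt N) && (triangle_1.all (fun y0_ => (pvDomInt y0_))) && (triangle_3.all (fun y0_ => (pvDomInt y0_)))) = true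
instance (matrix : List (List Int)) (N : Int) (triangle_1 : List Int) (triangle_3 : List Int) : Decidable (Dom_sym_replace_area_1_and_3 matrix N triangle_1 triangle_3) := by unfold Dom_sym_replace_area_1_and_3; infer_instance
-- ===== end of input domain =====

-- B replaces A's N×N scan with an in_area membership test per cell by direct per-row
-- index ranges (objective: simpler). Both Pythons mutate `matrix` in place; the
-- equivalence proved here is about the RETURN value (B performs the same mutation).

-- ===== PORT A =====
def in_area (i j N area_num : Int) : Bool :=
  if area_num = 1 then decide (i > j) && decide (i + j < N - 1)
  else if area_num = 2 then decide (i < j) && decide (i + j < N - 1)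
  else if area_num = 3 then decide (i < j) && decide (i + j > N - 1)
  else if area_num = 4 then decide (i > j) && decide (i + j > N - 1)
  else false

-- state = (matrix, idx_1, idx_3); i, j come from range(N) so they are ≥ 0 and .toNat
-- is exact; matrix[i][j] = v and triangle[idx] out of range RAISE in Python — those
-- inputs are excluded by Pre_ (here List.modify/List.set are no-ops and pyGetD defaults).
def sym_replace_area_1_and_3 (matrix : List (List Int)) (N : Int) (triangle_1 : List Int) (triangle_3 : List Int) : List (List Int) :=
  ((PySem.List.pyRange 0 N 1).foldl (fun st i =>
    (PySem.List.pyRange 0 N 1).foldl (fun st j =>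
      if in_area i j N 1 then
        (st.1.modify i.toNat (fun r => r.set j.toNat (PySem.List.pyGetD triangle_3 st.2.2 0)), st.2.1, st.2.2 + 1)
      else if in_area i j N 3 then
        (st.1.modify i.toNat (fun r => r.set j.toNat (PySem.List.pyGetD triangle_1 st.2.1 0)), st.2.1 + 1, st.2.2)
      else st) st) (matrix, 0, 0)).1

-- ===== PORT B =====
-- transliteration of Source B: loop i over range(1, N-1); k = min(i, N-1-i); fill the k
-- area-1 cells j ∈ [0,k) of row i from triangle_3, then the k area-3 cells j ∈ [N-k,N)
-- from triangle_1; `row = matrix[i]` aliases the row, modelled by writing it back with set.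
def sym_replace_area_1_and_3_alt (matrix : List (List Int)) (N : Int) (triangle_1 : List Int) (triangle_3 : List Int) : List (List Int) :=
  ((PySem.List.pyRange 1 (N - 1) 1).foldl (fun st i =>
    let k := min i (N - 1 - i)
    let row := PySem.List.pyGetD st.1 i []
    let p3 := (PySem.List.pyRange 0 k 1).foldl
      (fun p j => (p.1.set j.toNat (PySem.List.pyGetD triangle_3 p.2 0), p.2 + 1)) (row, st.2.2)
    let p1 := (PySem.List.pyRange (N - k) N 1).foldl
      (fun p j => (p.1.set j.toNat (PySem.List.pyGetD triangle_1 p.2 0), p.2 + 1)) (p3.1, st.2.1)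
    (st.1.set i.toNat p1.1, p1.2, p3.2)) (matrix, 0, 0)).1

-- ===== PRECONDITION & SPEC =====
-- Pre_ = exactly the inputs where Python A returns: every touched row (indices 1..N-2)
-- exists and has length ≥ N, and each triangle holds the ⌊(N-1)²/4⌋ values consumed.
def Pre_sym_replace_area_1_and_3 (matrix : List (List Int)) (N : Int) (triangle_1 : List Int) (triangle_3 : List Int) : Prop :=
  N ≤ 2 ∨ (N - 1 ≤ (matrix.length : Int)
    ∧ (∀ r ∈ (matrix.take (N - 1).toNat).drop 1, N ≤ (r.length : Int))
    ∧ (N - 1) ^ 2 / 4 ≤ (triangle_1.length : Int)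
    ∧ (N - 1) ^ 2 / 4 ≤ (triangle_3.length : Int))
instance (matrix : List (List Int)) (N : Int) (triangle_1 : List Int) (triangle_3 : List Int) : Decidable (Pre_sym_replace_area_1_and_3 matrix N triangle_1 triangle_3) := by unfold Pre_sym_replace_area_1_and_3; infer_instance

def pvWitness_sym_replace_area_1_and_3 : List (List Int) × Int × List Int × List Int :=
  ([[1, 2, 3], [4, 5, 6], [7, 8, 9]], 3, [10], [30])

def Spec_sym_replace_area_1_and_3 (matrix : List (List Int)) (N : Int) (triangle_1 : List Int) (triangle_3 : List Int) (out : List (List Int)) : Prop := out = sym_replace_area_1_and_3_alt matrix N triangle_1 triangle_3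
instance (matrix : List (List Int)) (N : Int) (triangle_1 : List Int) (triangle_3 : List Int) (out : List (List Int)) : Decidable (Spec_sym_replace_area_1_and_3 matrix N triangle_1 triangle_3 out) := by unfold Spec_sym_replace_area_1_and_3; infer_instance

-- ===== CLAIM (what is proved, stated in full; the proofs are below) =====
def Claim_equal_sym_replace_area_1_and_3 : Prop := ∀ (matrix : List (List Int)) (N : Int) (triangle_1 : List Int) (triangle_3 : List Int), Dom_sym_replace_area_1_and_3 matrix N triangle_1 triangle_3 → Pre_sym_replace_area_1_and_3 matrix N triangle_1 triangle_3 → Spec_sym_replace_area_1_and_3 matrix N triangle_1 triangle_3 (sym_replace_area_1_and_3 matrix N triangle_1 triangle_3)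

-- ===== LEMMAS AND PROOFS =====

-- the body of A's outer loop (definitionally the lambda in the port of A)
def pvARow (N : Int) (t1 t3 : List Int) (i : Int) (st : List (List Int) × Int × Int) : List (List Int) × Int × Int :=
  (PySem.List.pyRange 0 N 1).foldl (fun st j =>
    if in_area i j N 1 then
      (st.1.modify i.toNat (fun r => r.set j.toNat (PySem.List.pyGetD t3 st.2.2 0)), st.2.1, st.2.2 + 1)
    else if in_area i j N 3 then
      (st.1.modify i.toNat (fun r => r.set j.toNat (PySem.List.pyGetD t1 st.2.1 0)), st.2.1 + 1, st.2.2)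
    else st) st

-- the body of B's loop (definitionally the lambda in the port of B)
def pvBRow (N : Int) (t1 t3 : List Int) (i : Int) (st : List (List Int) × Int × Int) : List (List Int) × Int × Int :=
  let k := min i (N - 1 - i)
  let row := PySem.List.pyGetD st.1 i []
  let p3 := (PySem.List.pyRange 0 k 1).foldl
    (fun p j => (p.1.set j.toNat (PySem.List.pyGetD t3 p.2 0), p.2 + 1)) (row, st.2.2)
  let p1 := (PySem.List.pyRange (N - k) N 1).foldl
    (fun p j => (p.1.set j.toNat (PySem.List.pyGetD t1 p.2 0), p.2 + 1)) (p3.1, st.2.1)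
  (st.1.set i.toNat p1.1, p1.2, p3.2)

theorem pv_in_area_one (i j N : Int) : in_area i j N 1 = true ↔ (j < i ∧ i + j < N - 1) := by
  unfold in_area; norm_num

theorem pv_in_area_three (i j N : Int) : in_area i j N 3 = true ↔ (i < j ∧ N - 1 < i + j) := by
  unfold in_area; norm_num

theorem pv_foldl_fix {α β : Type} (f : β → α → β) (js : List α) (st : β)
    (h : ∀ st x, x ∈ js → f st x = st) : js.foldl f st = st := by
  induction js generalizing st with
  | nil => rfl
  | cons a t ih =>
    simp only [List.foldl_cons, h st a (by simp)]
    exact ih st fun st x hx => h st x (by simp [hx])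

theorem pv_modify_eq_set_getD (l : List (List Int)) (i : Nat) (f : List Int → List Int) :
    l.modify i f = l.set i (f (l.getD i [])) := by
  induction l generalizing i with
  | nil => simp
  | cons a t ih =>
    cases i with
    | zero => simp [List.getD]
    | succ n =>
      show a :: t.modify n f = a :: t.set n (f ((a :: t).getD (n + 1) []))
      rw [ih]
      rfl

theorem pv_getD_set_self (l : List (List Int)) (i : Nat) (g : List Int → List Int)
    (hg : g [] = []) : (l.set i (g (l.getD i []))).getD i [] = g (l.getD i []) := by
  rcases Nat.lt_or_ge i l.length with h | h
  · simp [List.getD_eq_getElem?_getD, h]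
  · rw [List.set_eq_of_length_le h]
    have hnone : l[i]? = none := List.getElem?_eq_none (by omega)
    simp [List.getD_eq_getElem?_getD, hnone, hg]

theorem pv_set_getD (l : List (List Int)) (i : Nat) :
    l.set i (l.getD i []) = l := by
  rcases Nat.lt_or_ge i l.length with h | h
  · simp [List.getD_eq_getElem?_getD, List.getElem?_eq_getElem h, List.set_getElem_self]
  · exact List.set_eq_of_length_le h

-- the sequence of writes from triangle_3 (state (matrix, idx1, idx3), idx3 advancing)
-- rewritten as a single row update
theorem pv_chain3 (t3 : List Int) (iN : Nat) (js : List Int) :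
    ∀ (m : List (List Int)) (i1 c : Int),
    js.foldl (fun (st : List (List Int) × Int × Int) j =>
        (st.1.modify iN (fun r => r.set j.toNat (PySem.List.pyGetD t3 st.2.2 0)), st.2.1, st.2.2 + 1)) (m, i1, c)
    = ((m.set iN (js.foldl (fun (p : List Int × Int) j => (p.1.set j.toNat (PySem.List.pyGetD t3 p.2 0), p.2 + 1)) (m.getD iN [], c)).1),
       i1,
       (js.foldl (fun (p : List Int × Int) j => (p.1.set j.toNat (PySem.List.pyGetD t3 p.2 0), p.2 + 1)) (m.getD iN [], c)).2) := by
  induction js with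
  | nil =>
    intro m i1 c
    simp only [List.foldl_nil]
    show _ = (m.set iN (m.getD iN []), _, _)
    rw [pv_set_getD]
  | cons a t ih =>
    intro m i1 c
    simp only [List.foldl_cons]
    rw [pv_modify_eq_set_getD]
    rw [ih]
    have hround := pv_getD_set_self m iN (fun r => r.set a.toNat (PySem.List.pyGetD t3 c 0)) (by simp)
    rw [hround, List.set_set]

theorem pv_chain1 (t1 : List Int) (iN : Nat) (js : List Int) :
    ∀ (m : List (List Int)) (i1 c : Int),
    js.foldl (fun (st : List (List Int) × Int × Int) j =>
        (st.1.modify iN (fun r => r.set j.toNat (PySem.List.pyGetD t1 st.2.1 0)), st.2.1 + 1, st.2.2)) (m, i1, c)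
    = ((m.set iN (js.foldl (fun (p : List Int × Int) j => (p.1.set j.toNat (PySem.List.pyGetD t1 p.2 0), p.2 + 1)) (m.getD iN [], i1)).1),
       (js.foldl (fun (p : List Int × Int) j => (p.1.set j.toNat (PySem.List.pyGetD t1 p.2 0), p.2 + 1)) (m.getD iN [], i1)).2,
       c) := by
  induction js with
  | nil =>
    intro m i1 c
    simp only [List.foldl_nil]
    show _ = (m.set iN (m.getD iN []), _, _)
    rw [pv_set_getD]
  | cons a t ih =>
    intro m i1 c
    simp only [List.foldl_cons]
    rw [pv_modify_eq_set_getD]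
    rw [ih]
    have hround := pv_getD_set_self m iN (fun r => r.set a.toNat (PySem.List.pyGetD t1 i1 0)) (by simp)
    rw [hround, List.set_set]

-- a fold of row writes started on [] stays []
theorem pv_fold_set_nil (t : List Int) (js : List Int) :
    ∀ (c : Int), (js.foldl (fun (p : List Int × Int) j => (p.1.set j.toNat (PySem.List.pyGetD t p.2 0), p.2 + 1)) ([], c)).1 = [] := by
  induction js with
  | nil => intro c; rfl
  | cons a tl ih => intro c; simpa using ih (c + 1)

-- A's inner loop over row i equals B's body, for every row 0 ≤ i ≤ N-1
theorem pv_row_step (N : Int) (t1 t3 : List Int) (i : Int) (h1 : 0 ≤ i) (h2 : i ≤ N - 1)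
    (st : List (List Int) × Int × Int) :
    pvARow N t1 t3 i st = pvBRow N t1 t3 i st := by
  obtain ⟨m, i1, i3⟩ := st
  simp only [pvARow, pvBRow]
  have hki : min i (N - 1 - i) ≤ i := min_le_left _ _
  have hkN : min i (N - 1 - i) ≤ N - 1 - i := min_le_right _ _
  have hkor : min i (N - 1 - i) = i ∨ min i (N - 1 - i) = N - 1 - i := min_choice _ _
  set k := min i (N - 1 - i) with hk
  have hk0 : 0 ≤ k := le_min h1 (by omega)
  clear_value k
  clear hk
  have hsplit1 : PySem.List.pyRange 0 N 1 = PySem.List.pyRange 0 k 1 ++ PySem.List.pyRange k N 1 :=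
    PySem.List.pyRange_one_append 0 k N (by omega) (by omega)
  have hsplit2 : PySem.List.pyRange k N 1 = PySem.List.pyRange k (N - k) 1 ++ PySem.List.pyRange (N - k) N 1 :=
    PySem.List.pyRange_one_append k (N - k) N (by omega) (by omega)
  rw [hsplit1, hsplit2, List.foldl_append, List.foldl_append]
  -- segment 1: the condition in_area … 1 is true throughout
  rw [PySem.List.foldl_congr_mem (PySem.List.pyRange 0 k 1) _
    (fun (st : List (List Int) × Int × Int) j =>
      (st.1.modify i.toNat (fun r => r.set j.toNat (PySem.List.pyGetD t3 st.2.2 0)), st.2.1, st.2.2 + 1))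
    (m, i1, i3)
    (by
      intro acc j hj
      rw [PySem.List.mem_pyRange_one] at hj
      have hb1 : in_area i j N 1 = true := by
        rw [pv_in_area_one]
        omega
      simp [hb1])]
  rw [pv_chain3]
  -- middle segment: both conditions are false, the loop body is the identity
  rw [pv_foldl_fix _ (PySem.List.pyRange k (N - k) 1) _
    (by
      intro acc j hj
      rw [PySem.List.mem_pyRange_one] at hj
      have hb1 : in_area i j N 1 = false := by
        rw [Bool.eq_false_iff, Ne, pv_in_area_one]
        omega
      have hb3 : in_area i j N 3 = false := by
        rw [Bool.eq_false_iff, Ne, pv_in_area_three]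
        omega
      simp [hb1, hb3])]
  -- segment 3: in_area … 1 is false, in_area … 3 is true throughout
  rw [PySem.List.foldl_congr_mem (PySem.List.pyRange (N - k) N 1) _
    (fun (st : List (List Int) × Int × Int) j =>
      (st.1.modify i.toNat (fun r => r.set j.toNat (PySem.List.pyGetD t1 st.2.1 0)), st.2.1 + 1, st.2.2))
    _
    (by
      intro acc j hj
      rw [PySem.List.mem_pyRange_one] at hj
      have hb1 : in_area i j N 1 = false := by
        rw [Bool.eq_false_iff, Ne, pv_in_area_one]
        omega
      have hb3 : in_area i j N 3 = true := by
        rw [pv_in_area_three]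
        omega
      simp [hb1, hb3])]
  rw [pv_chain1]
  have hround := pv_getD_set_self m i.toNat
    (fun r => ((PySem.List.pyRange 0 k 1).foldl (fun (p : List Int × Int) j => (p.1.set j.toNat (PySem.List.pyGetD t3 p.2 0), p.2 + 1)) (r, i3)).1)
    (pv_fold_set_nil t3 _ i3)
  rw [hround, List.set_set, PySem.List.pyGetD_of_nonneg m [] h1]

-- B's body is the identity on the rows it never writes (k = min i (N-1-i) ≤ 0)
theorem pv_bbody_id (N : Int) (t1 t3 : List Int) (i : Int) (h1 : 0 ≤ i)
    (hk : min i (N - 1 - i) ≤ 0) (st : List (List Int) × Int × Int) :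
    pvBRow N t1 t3 i st = st := by
  obtain ⟨m, i1, i3⟩ := st
  simp only [pvBRow]
  have e1 : PySem.List.pyRange 0 (min i (N - 1 - i)) 1 = [] := PySem.List.pyRange_one_eq_nil hk
  have e2 : PySem.List.pyRange (N - min i (N - 1 - i)) N 1 = [] := PySem.List.pyRange_one_eq_nil (by omega)
  rw [e1, e2]
  simp only [List.foldl_nil]
  rw [PySem.List.pyGetD_of_nonneg m [] h1, pv_set_getD]

-- ===== VERDICT (by name: the statement is the Claim_ definition above) =====
theorem sym_replace_area_1_and_3_spec : Claim_equal_sym_replace_area_1_and_3 := by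
  intro matrix N t1 t3 _hDom _hPre
  unfold Spec_sym_replace_area_1_and_3 sym_replace_area_1_and_3 sym_replace_area_1_and_3_alt
  change (List.foldl (fun st i => pvARow N t1 t3 i st) (matrix, 0, 0) (PySem.List.pyRange 0 N 1)).1
       = (List.foldl (fun st i => pvBRow N t1 t3 i st) (matrix, 0, 0) (PySem.List.pyRange 1 (N - 1) 1)).1
  rcases le_or_gt N 1 with hN | hN
  · -- N ≤ 1: neither program writes anything
    have hB : PySem.List.pyRange 1 (N - 1) 1 = [] := PySem.List.pyRange_one_eq_nil (by omega)
    rw [hB]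
    rw [pv_foldl_fix _ (PySem.List.pyRange 0 N 1) _
      (by
        intro st i hi
        rw [PySem.List.mem_pyRange_one] at hi
        rw [pv_row_step N t1 t3 i hi.1 (by omega)]
        exact pv_bbody_id N t1 t3 i hi.1 (by omega) st)]
    rfl
  · -- N ≥ 2: peel rows 0 and N-1 (identity steps) and match the interior rows
    have hsplit1 : PySem.List.pyRange 0 N 1 = PySem.List.pyRange 0 1 1 ++ PySem.List.pyRange 1 N 1 :=
      PySem.List.pyRange_one_append 0 1 N (by omega) (by omega)
    have hsplit2 : PySem.List.pyRange 1 N 1 = PySem.List.pyRange 1 (N - 1) 1 ++ PySem.List.pyRange (N - 1) N 1 :=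
      PySem.List.pyRange_one_append 1 (N - 1) N (by omega) (by omega)
    have h01 : PySem.List.pyRange 0 1 1 = [0] := by
      have := PySem.List.pyRange_one_singleton (0 : Int)
      simpa using this
    have hN1 : PySem.List.pyRange (N - 1) N 1 = [N - 1] := by
      have := PySem.List.pyRange_one_singleton (N - 1 : Int)
      simpa using this
    rw [hsplit1, hsplit2, h01, hN1, List.foldl_append, List.foldl_append]
    simp only [List.foldl_cons, List.foldl_nil]
    rw [pv_row_step N t1 t3 0 le_rfl (by omega), pv_bbody_id N t1 t3 0 le_rfl (by omega)]
    rw [pv_row_step N t1 t3 (N - 1) (by omega) (by omega), pv_bbody_id N t1 t3 (N - 1) (by omega) (by omega)]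
    congr 1
    refine PySem.List.foldl_congr_mem _ _ _ _ ?_
    intro acc i hi
    rw [PySem.List.mem_pyRange_one] at hi
    exact pv_row_step N t1 t3 i (by omega) (by omega) acc
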